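-- pv_equiv track=rewrite | github.com/dododoyo/Competitive-Programming | 29-May-2024/Loud and Rich 161517.py | loudAndRich
-- ===== SOURCE A (Python) =====
-- from typing import List
--
-- def loudAndRich(richer: List[List[int]], quiet: List[int]) -> List[int]:
--     n = len(quiet)
--     richer_than = [[] for _ in range(n)]
--
--     for a, b in richer:
--         richer_than[b].append(a)
--
--     solution = [None] * n
--
--     def dfs(node):
--         if solution[node] is None:
--             solution[node] = node
--
--             for child in richer_than[node]:
--                 candidate = dfs(child)
--
--                 if quiet[candidate] < quiet[solution[node]]:
--                     solution[node] = candidate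
--
--         return solution[node]
--
--     return list(map(dfs, range(n)))
-- ===== SOURCE B (Python) =====
-- from typing import List
--
-- def loudAndRich(richer: List[List[int]], quiet: List[int]) -> List[int]:
--     n = len(quiet)
--     richer_than = [[] for _ in range(n)]
--     for a, b in richer:
--         richer_than[b].append(a)
--
--     solution = [None] * n
--     result = []
--     for start in range(n):
--         # explicit-stack elimination of A's recursion; top of stack = end of list
--         stack = [('call', start)]
--         while stack:
--             op = stack.pop()
--             if op[0] == 'call':
--                 node = op[1]
--                 if solution[node] is None:
--                     solution[node] = node
--                     for c in reversed(richer_than[node]):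
--                         stack.append(('upd', node, c))
--                         stack.append(('call', c))
--             else:
--                 _, node, c = op
--                 cand = solution[c]
--                 if quiet[cand] < quiet[solution[node]]:
--                     solution[node] = cand
--         result.append(solution[start])
--     return result
-- ===== Notes on version B (the rewrite author's own statement) =====
-- stated objective: alternative
-- what changed: A's memoised recursive dfs is replaced by an iterative explicit op-stack machine ('call'/'upd' ops) that eliminates the recursion while preserving the set-before-descend memo discipline, so deep graphs no longer grow the Python call stack.
import Mathlib
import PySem

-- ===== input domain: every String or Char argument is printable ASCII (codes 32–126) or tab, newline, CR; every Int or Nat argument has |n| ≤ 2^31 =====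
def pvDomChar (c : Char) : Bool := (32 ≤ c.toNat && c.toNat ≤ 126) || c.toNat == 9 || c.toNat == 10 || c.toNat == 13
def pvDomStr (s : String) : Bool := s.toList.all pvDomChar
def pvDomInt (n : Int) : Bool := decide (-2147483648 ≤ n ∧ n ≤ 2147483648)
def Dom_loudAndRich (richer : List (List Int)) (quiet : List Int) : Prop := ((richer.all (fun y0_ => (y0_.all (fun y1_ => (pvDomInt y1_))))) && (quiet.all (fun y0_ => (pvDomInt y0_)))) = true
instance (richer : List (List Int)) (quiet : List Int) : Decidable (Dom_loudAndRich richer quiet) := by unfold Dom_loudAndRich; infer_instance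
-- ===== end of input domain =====

-- B replaces A's memoised recursion by an explicit op-stack machine (iterative ↔ recursive
-- decomposition, same asymptotic cost); return values proved equal on all non-raising inputs.

-- ===== PORT A =====
-- shared index helpers (both Pythons read/write `solution`, `quiet`, `richer_than` the same way)
def pvNoneCount (sol : List (Option Int)) : Nat := sol.countP (fun o => o.isNone)

def pvReadSol (sol : List (Option Int)) (i : Int) : Int :=
  (PySem.List.pyGetD sol i none).getD 0      -- solution[i]; the defaults are unreachable under Pre_

def pvQuietAt (quiet : List Int) (i : Int) : Int :=
  PySem.List.pyGetD quiet i 0                -- quiet[i]; default unreachable under Pre_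

def pvBuildRT (richer : List (List Int)) (n : Nat) : List (List Int) :=
  richer.foldl (fun rt row =>
    match row with
    | [a, b] => PySem.List.pySetD rt b (PySem.List.pyGetD rt b [] ++ [a])  -- richer_than[b].append(a)
    | _ => rt)                               -- unreachable under Pre_ (Python: ValueError)
    (List.replicate n [])

-- A's `dfs`, with fuel for termination (the Python recursion is bounded by the number of
-- still-unset `solution` entries; fuel n+1 is never exhausted: see pvSim below);
-- pvDfsListA is dfs's `for child in richer_than[node]` loop as structural recursion
mutual
def pvDfsA (rt : List (List Int)) (quiet : List Int) :
    Nat → Int → List (Option Int) → Int × List (Option Int)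
  | 0, node, sol => (pvReadSol sol node, sol)   -- unreachable
  | f + 1, node, sol =>
    match PySem.List.pyGet? sol node with
    | some none =>                              -- solution[node] is None
      let sol2 := pvDfsListA rt quiet f node (PySem.List.pyGetD rt node [])
        (PySem.List.pySetD sol node (some node))
      (pvReadSol sol2 node, sol2)
    | _ => (pvReadSol sol node, sol)            -- memoised: return solution[node]
  termination_by f _ _ => (f, 0)

def pvDfsListA (rt : List (List Int)) (quiet : List Int) :
    Nat → Int → List Int → List (Option Int) → List (Option Int)
  | _, _, [], sol => sol
  | f, node, c :: cs, sol =>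
    let r := pvDfsA rt quiet f c sol            -- candidate = dfs(child)
    pvDfsListA rt quiet f node cs
      (if pvQuietAt quiet r.1 < pvQuietAt quiet (pvReadSol r.2 node)
       then PySem.List.pySetD r.2 node (some r.1) else r.2)
  termination_by f _ cs _ => (f, cs.length + 1)
end

def loudAndRich (richer : List (List Int)) (quiet : List Int) : List Int :=
  let n := quiet.length
  let rt := pvBuildRT richer n
  ((PySem.List.pyRange 0 (n : Int) 1).foldl
    (fun (p : List Int × List (Option Int)) i =>
      let r := pvDfsA rt quiet (n + 1) i p.2
      (p.1 ++ [r.1], r.2)) ([], List.replicate n none)).1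

-- ===== PORT B =====
inductive PVOp where
  | call (node : Int)
  | upd (node : Int) (child : Int)

-- the facts the machine's termination measure needs (cited in decreasing_by)
theorem pvIdx_lt (n : Nat) (i : Int) (k : Nat) (h : PySem.List.pyIdx? n i = some k) : k < n := by
  unfold PySem.List.pyIdx? at h
  split_ifs at h <;> simp_all <;> omega

theorem pvNoneCount_pySetD_le (sol : List (Option Int)) (i v : Int) :
    pvNoneCount (PySem.List.pySetD sol i (some v)) ≤ pvNoneCount sol := by
  unfold PySem.List.pySetD PySem.List.pySet?
  cases h : PySem.List.pyIdx? sol.length i with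
  | none => simp
  | some k =>
    have hk := pvIdx_lt _ _ _ h
    simp only [Option.map_some, Option.getD_some]
    unfold pvNoneCount
    rw [List.countP_set hk]
    simp only [Option.isNone_some, if_false, Bool.false_eq_true]
    split_ifs <;> omega

theorem pvNoneCount_pySetD_lt (sol : List (Option Int)) (i v : Int)
    (h : PySem.List.pyGet? sol i = some none) :
    pvNoneCount (PySem.List.pySetD sol i (some v)) < pvNoneCount sol := by
  unfold PySem.List.pyGet? at h
  unfold PySem.List.pySetD PySem.List.pySet?
  cases hk : PySem.List.pyIdx? sol.length i with
  | none => rw [hk] at h; simp at h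
  | some k =>
    rw [hk] at h
    simp only [Option.bind_some] at h
    have hklt := pvIdx_lt _ _ _ hk
    have hget : sol[k] = none := by
      have := List.getElem?_eq_getElem hklt
      rw [this] at h; exact Option.some_injective _ h
    simp only [Option.map_some, Option.getD_some]
    unfold pvNoneCount
    rw [List.countP_set hklt]
    have hpos : 0 < sol.countP (fun o => o.isNone) := by
      apply List.countP_pos_iff.mpr
      exact ⟨none, by rw [← hget]; exact List.getElem_mem hklt, rfl⟩
    simp only [hget]
    simp only [Option.isNone_none, Option.isNone_some, if_true, Bool.false_eq_true, if_false]
    omega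

-- Source B's while loop: pop the top op, dispatch, loop until the stack is empty
def pvExecB (rt : List (List Int)) (quiet : List Int) :
    List PVOp → List (Option Int) → List (Option Int)
  | [], sol => sol
  | PVOp.call node :: rest, sol =>
    match h : PySem.List.pyGet? sol node with
    | some none =>
      pvExecB rt quiet
        ((PySem.List.pyGetD rt node []).reverse.foldl
          (fun st c => PVOp.call c :: PVOp.upd node c :: st) rest)
        (PySem.List.pySetD sol node (some node))
    | _ => pvExecB rt quiet rest sol
  | PVOp.upd node c :: rest, sol =>
    pvExecB rt quiet rest
      (if pvQuietAt quiet (pvReadSol sol c) < pvQuietAt quiet (pvReadSol sol node)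
       then PySem.List.pySetD sol node (some (pvReadSol sol c)) else sol)
  termination_by stack sol => (pvNoneCount sol, stack.length)
  decreasing_by
  · exact Prod.Lex.left _ _ (pvNoneCount_pySetD_lt sol node node h)
  · exact Prod.Lex.right _ (Nat.lt_succ_self _)
  · split
    · rcases Nat.lt_or_ge (pvNoneCount (PySem.List.pySetD sol node (some (pvReadSol sol c)))) (pvNoneCount sol) with hlt | hge
      · exact Prod.Lex.left _ _ hlt
      · rw [le_antisymm (pvNoneCount_pySetD_le sol node (pvReadSol sol c)) hge]
        exact Prod.Lex.right _ (Nat.lt_succ_self _)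
    · exact Prod.Lex.right _ (Nat.lt_succ_self _)

def loudAndRich_alt (richer : List (List Int)) (quiet : List Int) : List Int :=
  let n := quiet.length
  let rt := pvBuildRT richer n
  ((PySem.List.pyRange 0 (n : Int) 1).foldl
    (fun (p : List Int × List (Option Int)) start =>
      let sol' := pvExecB rt quiet [PVOp.call start] p.2
      (p.1 ++ [pvReadSol sol' start], sol')) ([], List.replicate n none)).1

-- ===== PRECONDITION & SPEC =====
-- Pre_ excludes exactly the inputs on which the Python raises: a row of `richer` that is not a
-- pair (ValueError on unpacking) or carries an index outside [-n, n) (IndexError), n = len(quiet).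
def Pre_loudAndRich (richer : List (List Int)) (quiet : List Int) : Prop :=
  ∀ row ∈ richer, row.length = 2 ∧
    ∀ x ∈ row, -(quiet.length : Int) ≤ x ∧ x < (quiet.length : Int)

instance (richer : List (List Int)) (quiet : List Int) : Decidable (Pre_loudAndRich richer quiet) := by
  unfold Pre_loudAndRich; infer_instance

def pvWitness_loudAndRich : List (List Int) × List Int := ([[1, 0]], [0, 1])

def Spec_loudAndRich (richer : List (List Int)) (quiet : List Int) (out : List Int) : Prop := out = loudAndRich_alt richer quiet
instance (richer : List (List Int)) (quiet : List Int) (out : List Int) : Decidable (Spec_loudAndRich richer quiet out) := by unfold Spec_loudAndRich; infer_instance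

-- ===== CLAIM (what is proved, stated in full; the proofs are below) =====
def Claim_equal_loudAndRich : Prop := ∀ (richer : List (List Int)) (quiet : List Int), Dom_loudAndRich richer quiet → Pre_loudAndRich richer quiet → Spec_loudAndRich richer quiet (loudAndRich richer quiet)

-- ===== LEMMAS AND PROOFS =====

theorem pvNoneCount_ite_le (sol : List (Option Int)) (i v : Int) (c : Prop) [Decidable c] :
    pvNoneCount (if c then PySem.List.pySetD sol i (some v) else sol) ≤ pvNoneCount sol := by
  split_ifs
  · exact pvNoneCount_pySetD_le sol i v
  · exact le_refl _

theorem pvExecB_nil (rt : List (List Int)) (quiet : List Int) (sol : List (Option Int)) :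
    pvExecB rt quiet [] sol = sol := by
  rw [pvExecB]

theorem pvExecB_call_work (rt : List (List Int)) (quiet : List Int) (node : Int)
    (rest : List PVOp) (sol : List (Option Int))
    (hg : PySem.List.pyGet? sol node = some none) :
    pvExecB rt quiet (PVOp.call node :: rest) sol
      = pvExecB rt quiet
          ((PySem.List.pyGetD rt node []).reverse.foldl
            (fun st c => PVOp.call c :: PVOp.upd node c :: st) rest)
          (PySem.List.pySetD sol node (some node)) := by
  rw [pvExecB]
  split <;> simp_all

theorem pvExecB_call_skip (rt : List (List Int)) (quiet : List Int) (node : Int)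
    (rest : List PVOp) (sol : List (Option Int))
    (hg : PySem.List.pyGet? sol node ≠ some none) :
    pvExecB rt quiet (PVOp.call node :: rest) sol = pvExecB rt quiet rest sol := by
  rw [pvExecB]
  split <;> simp_all

theorem pvExecB_upd (rt : List (List Int)) (quiet : List Int) (node c : Int)
    (rest : List PVOp) (sol : List (Option Int)) :
    pvExecB rt quiet (PVOp.upd node c :: rest) sol
      = pvExecB rt quiet rest
          (if pvQuietAt quiet (pvReadSol sol c) < pvQuietAt quiet (pvReadSol sol node)
           then PySem.List.pySetD sol node (some (pvReadSol sol c)) else sol) := by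
  rw [pvExecB]

-- the simulation: running the machine on a `call node` op is running A's dfs;
-- bundled with dfs's value law (dfs returns solution[node] of its final state)
-- and monotonicity of the count of unset entries (which also shows A's fuel suffices)
theorem pvSim (rt : List (List Int)) (quiet : List Int) :
    ∀ (f : Nat) (node : Int) (sol : List (Option Int)), pvNoneCount sol < f →
      pvNoneCount (pvDfsA rt quiet f node sol).2 ≤ pvNoneCount sol ∧
      (pvDfsA rt quiet f node sol).1 = pvReadSol (pvDfsA rt quiet f node sol).2 node ∧
      ∀ rest, pvExecB rt quiet (PVOp.call node :: rest) sol
              = pvExecB rt quiet rest (pvDfsA rt quiet f node sol).2 := by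
  intro f
  induction f with
  | zero => intro node sol h; exact absurd h (Nat.not_lt_zero _)
  | succ f ih =>
    have simlist : ∀ (node : Int) (cs : List Int) (sol : List (Option Int)), pvNoneCount sol < f →
        pvNoneCount (pvDfsListA rt quiet f node cs sol) ≤ pvNoneCount sol ∧
        ∀ rest, pvExecB rt quiet
                  (cs.reverse.foldl (fun st c => PVOp.call c :: PVOp.upd node c :: st) rest) sol
              = pvExecB rt quiet rest (pvDfsListA rt quiet f node cs sol) := by
      intro node cs
      induction cs with
      | nil =>
        intro sol h
        exact ⟨by rw [pvDfsListA], fun rest => by rw [pvDfsListA]; simp⟩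
      | cons c cs ihc =>
        intro sol h
        obtain ⟨hmono, hval, hexec⟩ := ih c sol h
        have hite : pvNoneCount (if pvQuietAt quiet (pvDfsA rt quiet f c sol).1
              < pvQuietAt quiet (pvReadSol (pvDfsA rt quiet f c sol).2 node)
            then PySem.List.pySetD (pvDfsA rt quiet f c sol).2 node (some (pvDfsA rt quiet f c sol).1)
            else (pvDfsA rt quiet f c sol).2) ≤ pvNoneCount sol := by
          exact le_trans (pvNoneCount_ite_le _ _ _ _) hmono
        obtain ⟨m2, e2⟩ := ihc _ (lt_of_le_of_lt hite h)
        refine ⟨?_, fun rest => ?_⟩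
        · rw [pvDfsListA]
          exact le_trans m2 hite
        · have hstack : ((c :: cs).reverse).foldl
              (fun st c => PVOp.call c :: PVOp.upd node c :: st) rest
              = PVOp.call c :: PVOp.upd node c
                :: (cs.reverse.foldl (fun st c => PVOp.call c :: PVOp.upd node c :: st) rest) := by
            simp [List.foldl_append]
          rw [hstack, hexec, pvExecB_upd, pvDfsListA]
          rw [← hval]
          exact e2 rest
    intro node sol h
    cases hg : PySem.List.pyGet? sol node with
    | none =>
      refine ⟨?_, ?_, fun rest => ?_⟩
      · rw [pvDfsA]; simp [hg]
      · rw [pvDfsA]; simp [hg]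
      · rw [pvDfsA]; simp only [hg]
        rw [pvExecB_call_skip rt quiet node rest sol (by simp [hg])]
    | some o =>
      cases o with
      | some v =>
        refine ⟨?_, ?_, fun rest => ?_⟩
        · rw [pvDfsA]; simp [hg]
        · rw [pvDfsA]; simp [hg]
        · rw [pvDfsA]; simp only [hg]
          rw [pvExecB_call_skip rt quiet node rest sol (by simp [hg])]
      | none =>
        have h1 : pvNoneCount (PySem.List.pySetD sol node (some node)) < pvNoneCount sol :=
          pvNoneCount_pySetD_lt sol node node hg
        have hf : pvNoneCount (PySem.List.pySetD sol node (some node)) < f := by omega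
        obtain ⟨m, e⟩ := simlist node (PySem.List.pyGetD rt node [])
          (PySem.List.pySetD sol node (some node)) hf
        refine ⟨?_, ?_, fun rest => ?_⟩
        · rw [pvDfsA]; simp only [hg]
          exact le_of_lt (lt_of_le_of_lt m h1)
        · rw [pvDfsA]; simp [hg]
        · rw [pvDfsA]; simp only [hg]
          rw [pvExecB_call_work rt quiet node rest sol hg]
          exact e rest
  
theorem pvTop (rt : List (List Int)) (quiet : List Int) (n : Nat) :
    ∀ (is : List Int) (acc : List Int) (sol : List (Option Int)), pvNoneCount sol ≤ n →
      is.foldl (fun (p : List Int × List (Option Int)) i =>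
          let r := pvDfsA rt quiet (n + 1) i p.2
          (p.1 ++ [r.1], r.2)) (acc, sol)
      = is.foldl (fun (p : List Int × List (Option Int)) start =>
          let sol' := pvExecB rt quiet [PVOp.call start] p.2
          (p.1 ++ [pvReadSol sol' start], sol')) (acc, sol) := by
  intro is
  induction is with
  | nil => intro acc sol h; rfl
  | cons i is ihl =>
    intro acc sol h
    obtain ⟨m, hv, he⟩ := pvSim rt quiet (n + 1) i sol (Nat.lt_succ_of_le h)
    simp only [List.foldl_cons]
    have e1 : pvExecB rt quiet [PVOp.call i] sol = (pvDfsA rt quiet (n + 1) i sol).2 := by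
      rw [he [], pvExecB_nil]
    rw [e1, ← hv, ihl _ _ (le_trans m h)]

-- ===== VERDICT (by name: the statement is the Claim_ definition above) =====
theorem loudAndRich_spec : Claim_equal_loudAndRich := by
  intro richer quiet _ _
  unfold Spec_loudAndRich loudAndRich loudAndRich_alt
  have h := pvTop (pvBuildRT richer quiet.length) quiet quiet.length
    (PySem.List.pyRange 0 (quiet.length : Int) 1) [] (List.replicate quiet.length none)
    (by simp [pvNoneCount, List.countP_replicate])
  simp only at h ⊢
  rw [h]
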